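-- pv_equiv track=rewrite | github.com/wintermooon/Algorithm_study | pro_크레인 인형 뽑기.py | solution
-- ===== SOURCE A (Python) =====
-- def solution(board, moves):
--     answer = 0
--     basket = []
--     newboard = [[] for _ in range(len(board))]
--     for i in range(len(board)):
--         for j in range(len(board)-1,-1, -1):
--             if board[j][i] != 0:
--                 newboard[i].append(board[j][i])
--
--     for i in moves:
--         if len(newboard[i-1]) == 0:
--             continue
--         basket.append(newboard[i-1].pop())
--         if len(basket) < 2:
--             continue
--         if basket[-1] == basket[-2]:
--             basket.pop()
--             basket.pop()
--             answer += 2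
--     return answer
-- ===== SOURCE B (Python) =====
-- def solution(board, moves):
--     grid = [row[:] for row in board]
--     answer = 0
--     basket = []
--     for m in moves:
--         for row in grid:
--             doll = row[m - 1]
--             if doll != 0:
--                 row[m - 1] = 0
--                 if basket and basket[-1] == doll:
--                     basket.pop()
--                     answer += 2
--                 else:
--                     basket.append(doll)
--                 break
--     return answer
-- ===== Notes on version B (the rewrite author's own statement) =====
-- stated objective: idiomatic
-- what changed: B drops A's pre-built per-column stacks entirely: it copies the board and, for each move, scans that column top-down for the first nonzero cell, zeroes it and applies a check-before-push basket (pop+2 if the new doll equals the top, else push) instead of A's push-then-compare-last-two.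
-- outside the precondition, e.g. on solution([[1, 2, 3], [4, 2, 7]], [0, 0]): A returns 2, B returns 0
import Mathlib
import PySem

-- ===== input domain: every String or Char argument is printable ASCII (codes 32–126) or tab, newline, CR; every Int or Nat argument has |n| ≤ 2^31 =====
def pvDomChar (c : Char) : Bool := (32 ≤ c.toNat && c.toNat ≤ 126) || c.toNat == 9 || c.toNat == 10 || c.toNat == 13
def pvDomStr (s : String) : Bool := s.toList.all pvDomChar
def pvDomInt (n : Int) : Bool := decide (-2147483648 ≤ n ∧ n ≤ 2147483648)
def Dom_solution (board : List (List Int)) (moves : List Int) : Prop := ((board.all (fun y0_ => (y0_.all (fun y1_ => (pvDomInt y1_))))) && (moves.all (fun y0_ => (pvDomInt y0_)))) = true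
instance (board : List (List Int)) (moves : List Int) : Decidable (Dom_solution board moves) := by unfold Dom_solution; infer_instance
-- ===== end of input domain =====

-- B replaces A's pre-built per-column stacks with per-move top-down column scans on a
-- board copy and a check-before-push basket; return values proved equal on Pre_ (A also
-- mutates nothing observable — it builds its own stacks — and B copies the board).

-- ===== PORT A =====
def buildNew (board : List (List Int)) : List (List Int) :=
  (PySem.List.pyRange 0 (board.length : Int) 1).map (fun i =>
    (PySem.List.pyRange ((board.length : Int) - 1) (-1) (-1)).foldl
      (fun col j =>
        let v := PySem.List.pyGetD (PySem.List.pyGetD board j []) i 0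
        if v ≠ 0 then col ++ [v] else col) [])

def stepA (st : Int × List Int × List (List Int)) (i : Int) : Int × List Int × List (List Int) :=
  let answer := st.1
  let basket := st.2.1
  let nb := st.2.2
  let col := PySem.List.pyGetD nb (i - 1) []
  if col.length = 0 then st
  else
    let x := col.getLast?.getD 0
    let nb' := PySem.List.pySetD nb (i - 1) col.dropLast
    let basket' := basket ++ [x]
    if basket'.length < 2 then (answer, basket', nb')
    else if PySem.List.pyGetD basket' (-1) 0 = PySem.List.pyGetD basket' (-2) 0 then
      (answer + 2, basket'.dropLast.dropLast, nb')
    else (answer, basket', nb')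

def solution (board : List (List Int)) (moves : List Int) : Int :=
  (moves.foldl stepA (0, [], buildNew board)).1

-- ===== PORT B =====
def pickScan (m : Int) : List (List Int) → List (List Int) × Option Int
  | [] => ([], none)
  | row :: rest =>
    let doll := PySem.List.pyGetD row (m - 1) 0
    if doll ≠ 0 then (PySem.List.pySetD row (m - 1) 0 :: rest, some doll)
    else
      let r := pickScan m rest
      (row :: r.1, r.2)

def stepB (st : List (List Int) × Int × List Int) (m : Int) : List (List Int) × Int × List Int :=
  let grid := st.1
  let answer := st.2.1
  let basket := st.2.2
  match pickScan m grid with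
  | (grid', none) => (grid', answer, basket)
  | (grid', some doll) =>
    match basket.getLast? with
    | some t =>
      if t = doll then (grid', answer + 2, basket.dropLast)
      else (grid', answer, basket ++ [doll])
    | none => (grid', answer, basket ++ [doll])

def solution_alt (board : List (List Int)) (moves : List Int) : Int :=
  (moves.foldl stepB (board, 0, [])).2.1

-- ===== PRECONDITION & SPEC =====
-- Pre_ restricts to the game's natural domain: boards whose rows reach the board's width with
-- 1-based in-range moves, and exactly-square boards also with Python-wraparound (≤ 0) moves.
-- It excludes the inputs on which A raises IndexError, and the accidental combination of
-- over-long rows with a wraparound move, where A's choice of column is an artefact of its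
-- len(board)-bounded stack construction.
def Pre_solution (board : List (List Int)) (moves : List Int) : Prop :=
  ((∀ row ∈ board, board.length ≤ row.length) ∧
    (∀ m ∈ moves, 1 ≤ m ∧ m ≤ (board.length : Int))) ∨
  ((∀ row ∈ board, row.length = board.length) ∧
    (∀ m ∈ moves, 1 - (board.length : Int) ≤ m ∧ m ≤ (board.length : Int)))
instance (board : List (List Int)) (moves : List Int) : Decidable (Pre_solution board moves) := by
  unfold Pre_solution; infer_instance

def pvWitness_solution : List (List Int) × List Int := ([[0, 1], [2, 2]], [1, 2, 2, 1])

def Spec_solution (board : List (List Int)) (moves : List Int) (out : Int) : Prop := out = solution_alt board moves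
instance (board : List (List Int)) (moves : List Int) (out : Int) : Decidable (Spec_solution board moves out) := by unfold Spec_solution; infer_instance

-- ===== CLAIM (what is proved, stated in full; the proofs are below) =====
def Claim_equal_solution : Prop := ∀ (board : List (List Int)) (moves : List Int), Dom_solution board moves → Pre_solution board moves → Spec_solution board moves (solution board moves)

-- ===== LEMMAS AND PROOFS =====

-- column i of the grid, read top-to-bottom
def colI (grid : List (List Int)) (i : Int) : List Int :=
  grid.map (fun row => PySem.List.pyGetD row i 0)

-- the invariant tying B's mutable grid to A's stack list
def StackInv (n : Nat) (grid : List (List Int)) (nb : List (List Int)) : Prop :=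
  grid.length = n ∧ (∀ row ∈ grid, n ≤ row.length) ∧ nb.length = n ∧
  ∀ k : Nat, (h : k < nb.length) →
    nb[k] = ((colI grid (k : Int)).filter (fun v => decide (v ≠ 0))).reverse

lemma pyGetD_neg_natCast' {α : Type} (xs : List α) (j : Nat) (d : α)
    (h1 : 0 < j) (h2 : j ≤ xs.length) :
    PySem.List.pyGetD xs (-(j : Int)) d = xs.getD (xs.length - j) d := by
  simp [PySem.List.pyGetD, PySem.List.pyGet?_neg_natCast xs j h1 h2, List.getD_eq_getElem?_getD]

lemma pySetD_neg_natCast' {α : Type} (xs : List α) (j : Nat) (v : α)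
    (h1 : 0 < j) (h2 : j ≤ xs.length) :
    PySem.List.pySetD xs (-(j : Int)) v = xs.set (xs.length - j) v := by
  simp [PySem.List.pySetD, PySem.List.pySet?, PySem.List.pyIdx?, Nat.pos_iff_ne_zero.mp h1, h2]

lemma buildCol_eq (board : List (List Int)) (i : Int) :
    (PySem.List.pyRange ((board.length : Int) - 1) (-1) (-1)).foldl
      (fun col j =>
        let v := PySem.List.pyGetD (PySem.List.pyGetD board j []) i 0
        if v ≠ 0 then col ++ [v] else col) []
    = ((colI board i).filter (fun v => decide (v ≠ 0))).reverse := by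
  have h1 : PySem.List.pyRange ((board.length : Int) - 1) (-1) (-1)
      = (PySem.List.pyRange 0 (board.length : Int) 1).reverse := by
    have := PySem.List.pyRange_neg_one_eq_reverse ((board.length : Int) - 1) (-1)
    simpa using this
  have hmap : (PySem.List.pyRange 0 (board.length : Int) 1).map
      (fun j => PySem.List.pyGetD (PySem.List.pyGetD board j []) i 0) = colI board i := by
    calc (PySem.List.pyRange 0 (board.length : Int) 1).map
          (fun j => PySem.List.pyGetD (PySem.List.pyGetD board j []) i 0)
        = ((PySem.List.pyRange 0 (board.length : Int) 1).map
            (fun j => PySem.List.pyGetD board j [])).map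
            (fun row => PySem.List.pyGetD row i 0) := by rw [List.map_map]; rfl
      _ = colI board i := by rw [PySem.List.map_pyGetD_pyRange_zero' board []]; rfl
  rw [h1, PySem.List.foldl_append_ite
    (fun j => PySem.List.pyGetD (PySem.List.pyGetD board j []) i 0 ≠ 0)
    (fun j => PySem.List.pyGetD (PySem.List.pyGetD board j []) i 0)]
  rw [List.filter_reverse, List.map_reverse, List.nil_append, ← hmap, List.filter_map]
  rfl

lemma buildNew_inv (board : List (List Int))
    (hsq : ∀ row ∈ board, board.length ≤ row.length) :
    StackInv board.length board (buildNew board) := by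
  refine ⟨rfl, hsq, ?_, ?_⟩
  · simp [buildNew, PySem.List.length_pyRange_one]
  · intro k hk
    simp only [buildNew, List.getElem_map, PySem.List.getElem_pyRange_one, zero_add]
    exact buildCol_eq board (k : Int)

lemma pickScan_none (m : Int) (grid : List (List Int))
    (h : ∀ row ∈ grid, PySem.List.pyGetD row (m - 1) 0 = 0) :
    pickScan m grid = (grid, none) := by
  induction grid with
  | nil => rfl
  | cons row rest ih =>
    have h0 := h row (by simp)
    simp [pickScan, h0, ih (fun r hr => h r (by simp [hr]))]

lemma pickScan_found (m : Int) (pre suf : List (List Int)) (row : List Int)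
    (hpre : ∀ r ∈ pre, PySem.List.pyGetD r (m - 1) 0 = 0)
    (hrow : PySem.List.pyGetD row (m - 1) 0 ≠ 0) :
    pickScan m (pre ++ row :: suf) =
      (pre ++ PySem.List.pySetD row (m - 1) 0 :: suf,
       some (PySem.List.pyGetD row (m - 1) 0)) := by
  induction pre with
  | nil => simp [pickScan, hrow]
  | cons r rs ih =>
    have h0 := hpre r (by simp)
    simp [pickScan, h0, ih (fun r' hr' => hpre r' (by simp [hr']))]

lemma pyGetD_penultimate (l : List Int) (x : Int) (h : l ≠ []) :
    PySem.List.pyGetD (l ++ [x]) (-2) 0 = l.getLast h := by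
  have hl : 1 ≤ l.length := List.length_pos_iff.mpr h
  rw [PySem.List.pyGetD_neg_ofNat (l ++ [x]) 2 0 (by omega) (by simp; omega)]
  apply Option.some.inj
  rw [← List.getElem?_eq_getElem, List.getElem?_append_left (by simp; omega),
      show (l ++ [x]).length - 2 = l.length - 1 from by simp,
      List.getElem?_eq_getElem (by omega), List.getLast_eq_getElem]

lemma step_eq (n k : Nat) (grid nb : List (List Int)) (ans : Int) (basket : List Int)
    (m : Int) (hinv : StackInv n grid nb) (hkn : k < n)
    (hgetRow : ∀ row ∈ grid, ∀ d : Int, PySem.List.pyGetD row (m - 1) d = row.getD k d)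
    (hsetRow : ∀ row ∈ grid, ∀ v : Int, PySem.List.pySetD row (m - 1) v = row.set k v)
    (hgetNb : ∀ d : List Int, PySem.List.pyGetD nb (m - 1) d = nb.getD k d)
    (hsetNb : ∀ v : List Int, PySem.List.pySetD nb (m - 1) v = nb.set k v) :
    ∃ grid' nb' ans' basket',
      stepA (ans, basket, nb) m = (ans', basket', nb') ∧
      stepB (grid, ans, basket) m = (grid', ans', basket') ∧
      StackInv n grid' nb' ∧
      (∀ L : Nat, (∀ row ∈ grid, row.length = L) → (∀ row ∈ grid', row.length = L)) := by
  obtain ⟨hg, hrows, hnb, hcols⟩ := hinv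
  have hknb : k < nb.length := by omega
  have hrowget : ∀ row ∈ grid, PySem.List.pyGetD row (m - 1) 0 = PySem.List.pyGetD row (k : Int) 0 := by
    intro row hr
    rw [hgetRow row hr 0, PySem.List.pyGetD_natCast]
  have hcol : PySem.List.pyGetD nb (m - 1) []
      = ((colI grid (k : Int)).filter (fun v => decide (v ≠ 0))).reverse := by
    rw [hgetNb [], ← hcols k hknb, List.getD_eq_getElem]
  by_cases hz : ∀ row ∈ grid, PySem.List.pyGetD row (m - 1) 0 = 0
  · -- empty column: both steps are no-ops
    have hfilter : (colI grid (k : Int)).filter (fun v => decide (v ≠ 0)) = [] := by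
      rw [List.filter_eq_nil_iff]
      intro a ha
      simp only [colI, List.mem_map] at ha
      obtain ⟨row, hrowm, rfl⟩ := ha
      have h0 := hz row hrowm
      rw [hrowget row hrowm] at h0
      simp [h0]
    have hempty : PySem.List.pyGetD nb (m - 1) [] = [] := by
      rw [hcol, hfilter]; rfl
    refine ⟨grid, nb, ans, basket, ?_, ?_, ⟨hg, hrows, hnb, hcols⟩, fun L hL => hL⟩
    · simp [stepA, hempty]
    · simp [stepB, pickScan_none m grid hz]
  · -- a doll is picked
    push Not at hz
    set p : List Int → Bool := fun row => decide (PySem.List.pyGetD row (m - 1) 0 = 0) with hp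
    have hdw : grid.dropWhile p ≠ [] := by
      rw [Ne, List.dropWhile_eq_nil_iff]
      push Not
      obtain ⟨row, hrowm, hne⟩ := hz
      exact ⟨row, hrowm, by simp [hp, hne]⟩
    obtain ⟨row, suf, hd⟩ := List.exists_cons_of_ne_nil hdw
    set pre := grid.takeWhile p with hpredef
    have hsplit : grid = pre ++ row :: suf := by
      rw [hpredef, ← hd, List.takeWhile_append_dropWhile]
    have hpre : ∀ r ∈ pre, PySem.List.pyGetD r (m - 1) 0 = 0 := by
      intro r hr
      have := List.mem_takeWhile_imp hr
      simpa [hp] using this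
    have hrow : PySem.List.pyGetD row (m - 1) 0 ≠ 0 := by
      have := List.head?_dropWhile_not p grid
      rw [hd] at this
      simpa [hp] using this
    set g0 : List Int → Int := fun r => PySem.List.pyGetD r (m - 1) 0 with hg0
    set d := g0 row with hddef
    set l' : List Int := ((suf.map g0).filter (fun v => decide (v ≠ 0))).reverse with hl'
    have hrowmem : row ∈ grid := by rw [hsplit]; simp
    have hpremem : ∀ r ∈ pre, r ∈ grid := by
      intro r hr; rw [hsplit]; simp [hr]
    have hsufmem : ∀ r ∈ suf, r ∈ grid := by
      intro r hr; rw [hsplit]; simp [hr]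
    have hrowlen : n ≤ row.length := hrows row hrowmem
    have hfilter : (colI grid (k : Int)).filter (fun v => decide (v ≠ 0))
        = d :: (suf.map g0).filter (fun v => decide (v ≠ 0)) := by
      have hcolIk : colI grid (k : Int) = grid.map g0 := by
        apply List.map_congr_left
        intro r hr
        exact (hrowget r hr).symm
      rw [hcolIk, hsplit]
      simp only [List.map_append, List.map_cons, List.filter_append, List.filter_cons]
      have h1 : (pre.map g0).filter (fun v => decide (v ≠ 0)) = [] := by
        rw [List.filter_eq_nil_iff]
        intro a ha
        simp only [List.mem_map] at ha
        obtain ⟨r, hr, rfl⟩ := ha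
        have := hpre r hr
        simp [hg0, this]
      simp only [h1, List.nil_append]
      rw [if_pos (by simpa [hg0] using hrow)]
    have hcolval : PySem.List.pyGetD nb (m - 1) [] = l' ++ [d] := by
      rw [hcol, hfilter, List.reverse_cons]
    -- the updated grid and stack list
    set row' := PySem.List.pySetD row (m - 1) 0 with hrow'
    set grid' := pre ++ row' :: suf with hgrid'
    have hset : PySem.List.pySetD nb (m - 1) l' = nb.set k l' := hsetNb l'
    have hAnb : PySem.List.pySetD nb (m - 1) (PySem.List.pyGetD nb (m - 1) []).dropLast
        = nb.set k l' := by
      rw [hcolval, List.dropLast_concat, hset]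
    have hrowlen' : row'.length = row.length := by
      rw [hrow', hsetRow row hrowmem 0]; simp
    have hget_row' : ∀ (j : Nat), PySem.List.pyGetD row' (j : Int) 0
        = if j = k then 0 else PySem.List.pyGetD row (j : Int) 0 := by
      intro j
      rw [hrow', hsetRow row hrowmem 0, ← PySem.List.pySetD_natCast]
      exact PySem.List.pyGetD_pySetD_natCast row k j 0 0 (by omega)
    have hinv' : StackInv n grid' (nb.set k l') := by
      refine ⟨?_, ?_, ?_, ?_⟩
      · have := congrArg List.length hsplit
        simp only [hgrid', List.length_append, List.length_cons] at *
        omega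
      · intro r hr
        rw [hgrid'] at hr
        simp only [List.mem_append, List.mem_cons] at hr
        rcases hr with hr | hr | hr
        · exact hrows r (hpremem r hr)
        · rw [hr, hrowlen']; exact hrowlen
        · exact hrows r (hsufmem r hr)
      · rw [List.length_set]; exact hnb
      · intro k' hk'
        have hk'n : k' < nb.length := by simpa using hk'
        by_cases hkk : k' = k
        · subst hkk
          rw [List.getElem_set_self]
          rw [hgrid']
          simp only [colI, List.map_append, List.map_cons, List.filter_append, List.filter_cons]
          have h1 : (pre.map (fun r => PySem.List.pyGetD r (k' : Int) 0)).filter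
              (fun v => decide (v ≠ 0)) = [] := by
            rw [List.filter_eq_nil_iff]
            intro a ha
            simp only [List.mem_map] at ha
            obtain ⟨r, hr, rfl⟩ := ha
            have h0 := hpre r hr
            rw [hrowget r (hpremem r hr)] at h0
            simp [h0]
          have h2 : PySem.List.pyGetD row' (k' : Int) 0 = 0 := by
            rw [hget_row' k']; simp
          rw [h2]
          simp only [h1, List.nil_append]
          rw [if_neg (by simp)]
          have hsufmap : suf.map (fun r => PySem.List.pyGetD r (k' : Int) 0) = suf.map g0 := by
            apply List.map_congr_left
            intro r hr
            exact (hrowget r (hsufmem r hr)).symm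
          rw [hsufmap, hl']
        · rw [List.getElem_set_ne (by omega)]
          rw [hcols k' hk'n]
          congr 2
          rw [hgrid', hsplit]
          simp only [colI, List.map_append, List.map_cons]
          congr 2
          rw [hget_row' k', if_neg hkk]
    have hpres : ∀ L : Nat, (∀ r ∈ grid, r.length = L) → (∀ r ∈ grid', r.length = L) := by
      intro L hL r hr
      rw [hgrid'] at hr
      simp only [List.mem_append, List.mem_cons] at hr
      rcases hr with hr | hr | hr
      · exact hL r (hpremem r hr)
      · rw [hr, hrowlen']; exact hL row hrowmem
      · exact hL r (hsufmem r hr)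
    -- evaluate the two steps
    have hBstep : pickScan m grid = (grid', some d) := by
      rw [hsplit, pickScan_found m pre suf row hpre hrow]
    rcases List.eq_nil_or_concat' basket with hb | ⟨bs, t, hb⟩
    · -- empty basket: push
      subst hb
      refine ⟨grid', nb.set k l', ans, [d], ?_, ?_, hinv', hpres⟩
      · simp [stepA, hcolval, hset]
      · simp [stepB, hBstep]
    · -- nonempty basket
      have hbne : basket ≠ [] := by rw [hb]; simp
      have hlast : basket.getLast? = some t := by rw [hb]; simp
      have hpen : PySem.List.pyGetD (basket ++ [d]) (-2) 0 = t := by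
        rw [pyGetD_penultimate basket d hbne]
        rw [List.getLast_eq_iff_getLast?_eq_some]
        exact hlast
      have hlen2 : ¬ (basket ++ [d]).length < 2 := by rw [hb]; simp
      have hfst : PySem.List.pyGetD (basket ++ [d]) (-1) 0 = d :=
        PySem.List.pyGetD_neg_one_append_singleton basket d 0
      by_cases htd : t = d
      · refine ⟨grid', nb.set k l', ans + 2, basket.dropLast, ?_, ?_, hinv', hpres⟩
        · simp only [stepA, hcolval]
          rw [List.getLast?_concat]
          simp only [Option.getD_some, List.dropLast_concat]
          rw [if_neg (by simp), if_neg hlen2, if_pos (by rw [hfst, hpen, htd])]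
          simp [hset]
        · simp [stepB, hBstep, hlast, htd]
      · refine ⟨grid', nb.set k l', ans, basket ++ [d], ?_, ?_, hinv', hpres⟩
        · simp only [stepA, hcolval]
          rw [List.getLast?_concat]
          simp only [Option.getD_some, List.dropLast_concat]
          rw [if_neg (by simp), if_neg hlen2, if_neg (by rw [hfst, hpen]; exact fun hh => htd hh.symm)]
          simp [hset]
        · simp [stepB, hBstep, hlast, htd]

lemma idx_norm (n : Nat) (m : Int) (grid nb : List (List Int))
    (hnb : nb.length = n)
    (hcase : (1 ≤ m ∧ m ≤ (n : Int)) ∨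
      ((∀ row ∈ grid, row.length = n) ∧ 1 - (n : Int) ≤ m ∧ m ≤ (n : Int))) :
    ∃ k : Nat, k < n ∧
      (∀ row ∈ grid, ∀ d : Int, PySem.List.pyGetD row (m - 1) d = row.getD k d) ∧
      (∀ row ∈ grid, ∀ v : Int, PySem.List.pySetD row (m - 1) v = row.set k v) ∧
      (∀ d : List Int, PySem.List.pyGetD nb (m - 1) d = nb.getD k d) ∧
      (∀ v : List Int, PySem.List.pySetD nb (m - 1) v = nb.set k v) := by
  rcases hcase with ⟨h1, h2⟩ | ⟨hsq, h1, h2⟩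
  · refine ⟨(m - 1).toNat, by omega, ?_, ?_, ?_, ?_⟩
    · intro row hr d
      rw [show m - 1 = (((m - 1).toNat : Nat) : Int) from by omega, PySem.List.pyGetD_natCast]; simp
    · intro row hr v
      rw [show m - 1 = (((m - 1).toNat : Nat) : Int) from by omega, PySem.List.pySetD_natCast]; simp
    · intro d
      rw [show m - 1 = (((m - 1).toNat : Nat) : Int) from by omega, PySem.List.pyGetD_natCast]; simp
    · intro v
      rw [show m - 1 = (((m - 1).toNat : Nat) : Int) from by omega, PySem.List.pySetD_natCast]; simp
  · by_cases hpos : 1 ≤ m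
    · refine ⟨(m - 1).toNat, by omega, ?_, ?_, ?_, ?_⟩
      · intro row hr d
        rw [show m - 1 = (((m - 1).toNat : Nat) : Int) from by omega, PySem.List.pyGetD_natCast]; simp
      · intro row hr v
        rw [show m - 1 = (((m - 1).toNat : Nat) : Int) from by omega, PySem.List.pySetD_natCast]; simp
      · intro d
        rw [show m - 1 = (((m - 1).toNat : Nat) : Int) from by omega, PySem.List.pyGetD_natCast]; simp
      · intro v
        rw [show m - 1 = (((m - 1).toNat : Nat) : Int) from by omega, PySem.List.pySetD_natCast]; simp
    · have hneg : m < 1 := by omega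
      have hn1 : 1 ≤ n := by omega
      refine ⟨n - (1 - m).toNat, by omega, ?_, ?_, ?_, ?_⟩
      · intro row hr d
        rw [show m - 1 = -(((1 - m).toNat : Nat) : Int) from by omega,
            pyGetD_neg_natCast' row (1 - m).toNat d (by omega) (by rw [hsq row hr]; omega),
            hsq row hr]
      · intro row hr v
        rw [show m - 1 = -(((1 - m).toNat : Nat) : Int) from by omega,
            pySetD_neg_natCast' row (1 - m).toNat v (by omega) (by rw [hsq row hr]; omega),
            hsq row hr]
      · intro d
        rw [show m - 1 = -(((1 - m).toNat : Nat) : Int) from by omega,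
            pyGetD_neg_natCast' nb (1 - m).toNat d (by omega) (by omega), hnb]
      · intro v
        rw [show m - 1 = -(((1 - m).toNat : Nat) : Int) from by omega,
            pySetD_neg_natCast' nb (1 - m).toNat v (by omega) (by omega), hnb]

lemma fold_eq (n : Nat) (moves : List Int) :
    ∀ (grid nb : List (List Int)) (ans : Int) (basket : List Int),
      StackInv n grid nb →
      ((∀ m ∈ moves, 1 ≤ m ∧ m ≤ (n : Int)) ∨
        ((∀ row ∈ grid, row.length = n) ∧
          (∀ m ∈ moves, 1 - (n : Int) ≤ m ∧ m ≤ (n : Int)))) →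
      (moves.foldl stepA (ans, basket, nb)).1 =
      (moves.foldl stepB (grid, ans, basket)).2.1 := by
  induction moves with
  | nil => intro grid nb ans basket _ _; rfl
  | cons m ms ih =>
    intro grid nb ans basket hinv hmode
    obtain ⟨k, hkn, hgetRow, hsetRow, hgetNb, hsetNb⟩ :=
      idx_norm n m grid nb hinv.2.2.1
        (by rcases hmode with h | ⟨hsq, h⟩
            · exact Or.inl (h m (by simp))
            · exact Or.inr ⟨hsq, h m (by simp)⟩)
    obtain ⟨grid', nb', ans', basket', hA, hB, hinv', hpres⟩ :=
      step_eq n k grid nb ans basket m hinv hkn hgetRow hsetRow hgetNb hsetNb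
    simp only [List.foldl_cons, hA, hB]
    apply ih grid' nb' ans' basket' hinv'
    rcases hmode with h | ⟨hsq, h⟩
    · exact Or.inl (fun x hx => h x (by simp [hx]))
    · exact Or.inr ⟨hpres n hsq, fun x hx => h x (by simp [hx])⟩

-- ===== VERDICT (by name: the statement is the Claim_ definition above) =====
theorem solution_spec : Claim_equal_solution := by
  intro board moves _ hpre
  unfold Spec_solution solution solution_alt
  rcases hpre with ⟨hrows, hmoves⟩ | ⟨hsq, hmoves⟩
  · exact fold_eq board.length moves board (buildNew board) 0 []
      (buildNew_inv board hrows) (Or.inl hmoves)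
  · exact fold_eq board.length moves board (buildNew board) 0 []
      (buildNew_inv board (fun row hr => (hsq row hr).ge)) (Or.inr ⟨hsq, hmoves⟩)
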